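-- pv_equiv track=rewrite | github.com/maxiwebs/CorsiBot | scripts/protocolos/mayoresDiferencias.py | indiceUltimoError
-- ===== SOURCE A (Python) =====
-- def indiceUltimoError(trial,rta):
--
--     size = min(len(trial),len(rta))
--     result = -1
--
--     for i in range(size):
--         if trial[size-i-1] != rta[size-i-1]:
--             result = i
--             break
--
--     return result
-- ===== SOURCE B (Python) =====
-- def indiceUltimoError(trial, rta):
--     size = min(len(trial), len(rta))
--     diffs = [j for j in range(size) if trial[j] != rta[j]]
--     return size - 1 - max(diffs) if diffs else -1
-- ===== Notes on version B (the rewrite author's own statement) =====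
-- stated objective: alternative
-- what changed: Replaced A's reverse early-exit scan with a single forward pass that collects all mismatch indices and reduces with max, returning size-1-max(diffs) or -1.
import Mathlib
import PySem

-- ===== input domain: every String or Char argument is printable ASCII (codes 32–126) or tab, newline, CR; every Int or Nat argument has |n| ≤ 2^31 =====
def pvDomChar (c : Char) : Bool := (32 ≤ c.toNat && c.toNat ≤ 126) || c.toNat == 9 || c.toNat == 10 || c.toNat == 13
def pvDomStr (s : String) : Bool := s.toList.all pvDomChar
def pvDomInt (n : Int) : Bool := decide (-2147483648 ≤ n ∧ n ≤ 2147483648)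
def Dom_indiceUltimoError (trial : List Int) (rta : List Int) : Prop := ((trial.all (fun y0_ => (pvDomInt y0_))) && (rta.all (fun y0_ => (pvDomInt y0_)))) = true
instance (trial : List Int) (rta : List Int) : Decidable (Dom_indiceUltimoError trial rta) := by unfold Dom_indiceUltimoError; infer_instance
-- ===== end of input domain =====

-- B replaces A's reverse early-exit scan by a forward pass collecting all mismatch
-- indices and reducing with max (objective: alternative decomposition, same cost).

-- ===== PORT A =====
-- A's loop `for i in range(size): if trial[size-i-1] != rta[size-i-1]: result = i; break`.
-- The index size-i-1 is always in range (0 ≤ size-i-1 < length), so Python indexing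
-- is exact here; it is ported as List.getD with an unreachable default.
def indiceUltimoErrorGo (trial : List Int) (rta : List Int) (size : Nat) (i : Nat) : Int :=
  if i < size then
    if trial.getD (size - i - 1) 0 ≠ rta.getD (size - i - 1) 0 then (i : Int)
    else indiceUltimoErrorGo trial rta size (i + 1)
  else -1
termination_by size - i

def indiceUltimoError (trial : List Int) (rta : List Int) : Int :=
  indiceUltimoErrorGo trial rta (min trial.length rta.length) 0

-- ===== PORT B =====
-- forward pass: collect every mismatch index j < size, then reduce with max.
def indiceUltimoError_alt (trial : List Int) (rta : List Int) : Int :=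
  let size := min trial.length rta.length
  let diffs := (List.range size).filter (fun j => trial.getD j 0 ≠ rta.getD j 0)
  match diffs.max? with
  | some m => (size : Int) - 1 - (m : Int)
  | none => -1

-- ===== PRECONDITION & SPEC =====
def Spec_indiceUltimoError (trial : List Int) (rta : List Int) (out : Int) : Prop := out = indiceUltimoError_alt trial rta
instance (trial : List Int) (rta : List Int) (out : Int) : Decidable (Spec_indiceUltimoError trial rta out) := by unfold Spec_indiceUltimoError; infer_instance

-- ===== CLAIM (what is proved, stated in full; the proofs are below) =====
def Claim_equal_indiceUltimoError : Prop := ∀ (trial : List Int) (rta : List Int), Dom_indiceUltimoError trial rta → Spec_indiceUltimoError trial rta (indiceUltimoError trial rta)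

-- ===== LEMMAS AND PROOFS =====

-- appending an element larger than all elements makes it the max
lemma max?_append_top (l : List Nat) (n : Nat) (h : ∀ x ∈ l, x < n) :
    (l ++ [n]).max? = some n := by
  induction l with
  | nil => rfl
  | cons a t ih =>
    have ha := h a (List.mem_cons_self)
    have ht : ∀ x ∈ t, x < n := fun x hx => h x (List.mem_cons_of_mem _ hx)
    have := ih ht
    simp only [List.cons_append, List.max?_cons] at *
    cases htn : (t ++ [n]).max? with
    | none => simp [htn] at this
    | some m =>
      rw [htn] at this
      simp only [Option.some.injEq] at this
      subst this
      simp [Nat.max_eq_right (Nat.le_of_lt ha)]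

lemma indiceUltimoErrorGo_eq (trial : List Int) (rta : List Int) (size : Nat) :
    ∀ i, indiceUltimoErrorGo trial rta size i =
      match ((List.range (size - i)).filter
              (fun j => trial.getD j 0 ≠ rta.getD j 0)).max? with
      | some m => (size : Int) - 1 - (m : Int)
      | none => -1 := by
  intro i
  induction hfu : size - i using Nat.strong_induction_on generalizing i with
  | _ fuel ih =>
    subst hfu
    rw [indiceUltimoErrorGo]
    by_cases hi : i < size
    · have hk : size - i = (size - i - 1) + 1 := by omega
      set k := size - i - 1 with hkdef
      rw [hk, List.range_succ, List.filter_append]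
      by_cases hp : trial.getD k 0 ≠ rta.getD k 0
      · have hdec : (fun j => decide (trial.getD j 0 ≠ rta.getD j 0)) k = true := by
          exact decide_eq_true hp
        have hall : ∀ x ∈ (List.range k).filter (fun j => trial.getD j 0 ≠ rta.getD j 0), x < k := by
          intro x hx
          exact List.mem_range.mp (List.mem_filter.mp hx).1
        rw [List.filter_cons, if_pos hdec, List.filter_nil, max?_append_top _ k hall]
        rw [if_pos hi, if_pos hp]
        show (i : Int) = (size : Int) - 1 - (k : Int)
        omega
      · have hdec : (fun j => decide (trial.getD j 0 ≠ rta.getD j 0)) k = false := by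
          simpa using hp
        rw [if_pos hi, if_neg hp, List.filter_cons, if_neg (by simp only [hdec]; exact Bool.false_ne_true), List.filter_nil,
          List.append_nil]
        have := ih (size - (i+1)) (by omega) (i+1) rfl
        have hstep : size - (i+1) = k := by omega
        rw [hstep] at this
        exact this
    · have h0 : size - i = 0 := by omega
      simp [hi, h0]

-- ===== VERDICT (by name: the statement is the Claim_ definition above) =====
theorem indiceUltimoError_spec : Claim_equal_indiceUltimoError := by
  intro trial rta _
  unfold Spec_indiceUltimoError indiceUltimoError indiceUltimoError_alt
  rw [indiceUltimoErrorGo_eq]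
  simp only [Nat.sub_zero]
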